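-- pv_equiv track=rewrite | github.com/sebastienibertpro-png/agri-automation-app | ephy_fetcher.py | _find_file
-- ===== SOURCE A (Python) =====
-- def _find_file(names: list, keywords: list, exclude: list = None) -> str | None:
--     for name in names:
--         lower = name.lower()
--         if not name.lower().endswith(".csv"):
--             continue
--         if all(kw in lower for kw in keywords):
--             if exclude and any(ex in lower for ex in exclude):
--                 continue
--             return name
--     # Fallback moins strict
--     for name in names:
--         lower = name.lower()
--         if not name.lower().endswith(".csv"):
--             continue
--         if any(kw in lower for kw in keywords):
--             return name
--     return None
-- ===== SOURCE B (Python) =====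
-- def _find_file(names: list, keywords: list, exclude: list = None) -> str | None:
--     fallback = None
--     for name in names:
--         lower = name.lower()
--         if not lower.endswith(".csv"):
--             continue
--         if all(kw in lower for kw in keywords) and not (exclude and any(ex in lower for ex in exclude)):
--             return name
--         if fallback is None and any(kw in lower for kw in keywords):
--             fallback = name
--     return fallback
-- ===== Notes on version B (the rewrite author's own statement) =====
-- stated objective: simpler
-- what changed: Replaces A's two full passes over names (strict pass, then a second loose fallback pass that re-lowercases and re-scans every name) by a single pass that returns a strict match immediately and remembers the first loose match as the fallback.
import Mathlib
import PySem

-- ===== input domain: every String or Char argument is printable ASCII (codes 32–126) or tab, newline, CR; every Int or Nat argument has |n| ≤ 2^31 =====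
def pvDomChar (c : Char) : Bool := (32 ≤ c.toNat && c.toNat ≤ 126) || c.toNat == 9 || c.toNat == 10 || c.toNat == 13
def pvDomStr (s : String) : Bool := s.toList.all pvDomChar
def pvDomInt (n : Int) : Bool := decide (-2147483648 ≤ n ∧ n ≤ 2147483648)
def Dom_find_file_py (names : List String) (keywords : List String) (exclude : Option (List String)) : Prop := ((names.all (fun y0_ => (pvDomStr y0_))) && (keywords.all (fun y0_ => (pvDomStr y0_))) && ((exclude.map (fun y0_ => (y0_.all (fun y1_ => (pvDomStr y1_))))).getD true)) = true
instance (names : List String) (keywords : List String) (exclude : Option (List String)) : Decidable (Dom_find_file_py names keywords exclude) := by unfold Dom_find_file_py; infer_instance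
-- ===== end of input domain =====

-- ===== PORT A =====
-- B replaces A's two passes (strict, then loose fallback) by one pass that saves the first loose match as fallback (objective: simpler).
def ffExcl (exclude : Option (List String)) (lower : String) : Bool :=
  match exclude with
  | none => false
  | some ex => !ex.isEmpty && ex.any (fun e => PySem.Str.isIn e lower)

def ffA_loop1 (keywords : List String) (exclude : Option (List String)) : List String → Option String
  | [] => none
  | name :: rest =>
    let lower := PySem.Str.lower name
    if !(PySem.Str.endswith (PySem.Str.lower name) ".csv") then ffA_loop1 keywords exclude rest
    else if keywords.all (fun kw => PySem.Str.isIn kw lower) then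
      if ffExcl exclude lower then ffA_loop1 keywords exclude rest
      else some name
    else ffA_loop1 keywords exclude rest

def ffA_loop2 (keywords : List String) : List String → Option String
  | [] => none
  | name :: rest =>
    let lower := PySem.Str.lower name
    if !(PySem.Str.endswith (PySem.Str.lower name) ".csv") then ffA_loop2 keywords rest
    else if keywords.any (fun kw => PySem.Str.isIn kw lower) then some name
    else ffA_loop2 keywords rest

def find_file_py (names : List String) (keywords : List String) (exclude : Option (List String)) : Option String :=
  match ffA_loop1 keywords exclude names with
  | some name => some name
  | none => ffA_loop2 keywords names

-- ===== PORT B =====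
def ffB_loop (keywords : List String) (exclude : Option (List String)) (fallback : Option String) : List String → Option String
  | [] => fallback
  | name :: rest =>
    let lower := PySem.Str.lower name
    if !(PySem.Str.endswith lower ".csv") then ffB_loop keywords exclude fallback rest
    else if keywords.all (fun kw => PySem.Str.isIn kw lower) && !(ffExcl exclude lower) then some name
    else if fallback.isNone && keywords.any (fun kw => PySem.Str.isIn kw lower) then
      ffB_loop keywords exclude (some name) rest
    else ffB_loop keywords exclude fallback rest

def find_file_py_alt (names : List String) (keywords : List String) (exclude : Option (List String)) : Option String :=
  ffB_loop keywords exclude none names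

-- ===== PRECONDITION & SPEC =====
def Spec_find_file_py (names : List String) (keywords : List String) (exclude : Option (List String)) (out : Option String) : Prop := out = find_file_py_alt names keywords exclude
instance (names : List String) (keywords : List String) (exclude : Option (List String)) (out : Option String) : Decidable (Spec_find_file_py names keywords exclude out) := by unfold Spec_find_file_py; infer_instance

-- ===== CLAIM (what is proved, stated in full; the proofs are below) =====
def Claim_equal_find_file_py : Prop := ∀ (names : List String) (keywords : List String) (exclude : Option (List String)), Dom_find_file_py names keywords exclude → Spec_find_file_py names keywords exclude (find_file_py names keywords exclude)

-- ===== LEMMAS AND PROOFS =====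

-- ===== VERDICT (by name: the statement is the Claim_ definition above) =====
theorem ffB_loop_eq (keywords : List String) (exclude : Option (List String))
    (names : List String) (fb : Option String) :
    ffB_loop keywords exclude fb names =
      (ffA_loop1 keywords exclude names).or (fb.or (ffA_loop2 keywords names)) := by
  induction names generalizing fb with
  | nil => cases fb <;> simp [ffB_loop, ffA_loop1, ffA_loop2]
  | cons name rest ih =>
    simp only [ffB_loop, ffA_loop1, ffA_loop2]
    simp only [Bool.not_eq_eq_eq_not, Bool.not_true, Bool.and_eq_true]
    split_ifs with h1 h2 h3 h4 h5 h6 h7 h8 h9 h10 h11 h12 h13 h14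
    all_goals first
      | exact ih fb
      | (simp [Option.or]; done)
      | exact absurd h2.1 h3
      | (simp [h2.2] at h4)
      | (exfalso; simp_all; done)
      | (rw [ih, Option.isNone_iff_eq_none.mp h8.1]
         cases hA : ffA_loop1 keywords exclude rest <;> simp [Option.or]
         done)
      | (exfalso; apply h2; refine ⟨h9, ?_⟩; simp_all; done)
      | (exfalso; apply h2; refine ⟨h14, ?_⟩; simp_all; done)
      | (rw [ih fb]
         rcases fb with _ | v
         · exact absurd ⟨rfl, by assumption⟩ h8
         · simp [Option.or]
         done)

theorem find_file_py_spec : Claim_equal_find_file_py := by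
  intro names keywords exclude _
  unfold Spec_find_file_py find_file_py find_file_py_alt
  rw [ffB_loop_eq]
  cases ffA_loop1 keywords exclude names <;> simp
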